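-- pv_equiv track=rewrite | github.com/aspect-build/rules_py | v2.py | _extract_requirement_marker_pairs
-- ===== SOURCE A (Python) =====
-- def _extract_requirement_marker_pairs(req_string, version_map):
--     """
--     Parses a requirement string into a list of ((name, version, extra), marker) pairs.
--
--     Args:
--         req_string: The requirement string (e.g., "foo[bar]>=1.0; sys_platform == 'linux'").
--         version_map: A dict mapping package names to default version strings.
--
--     Returns:
--         A list of tuples [((name, version, extra), marker), ...].
--         The marker is a string or None.
--     """
--     # 1. Split Requirement and Marker
--     # Starlark split() often doesn't support maxsplit, so we use find() + slicing
--     semicolon_idx = req_string.find(";")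
--
--     marker = None
--     if semicolon_idx != -1:
--         # Extract and clean the marker
--         marker_text = req_string[semicolon_idx + 1:].strip()
--         if marker_text:
--             marker = marker_text
--         # The requirement part is everything before the semicolon
--         req_part = req_string[:semicolon_idx].strip()
--     else:
--         req_part = req_string.strip()
--
--     if not req_part:
--         return []
--
--     # 2. Identify end of package name within req_part
--     stop_chars = {
--         "[": 1,
--         "=": 1,
--         ">": 1,
--         "<": 1,
--         "!": 1,
--         "~": 1,
--         " ": 1
--     }
--
--     name_end_idx = len(req_part)
--
--     for i in range(len(req_part)):
--         char = req_part[i]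
--         if char in stop_chars:
--             name_end_idx = i
--             break
--
--     pkg_name = req_part[:name_end_idx]
--
--     # 3. Extract Extras from req_part
--     extras = []
--
--     remainder = req_part[name_end_idx:]
--
--     if remainder.startswith("["):
--         close_idx = remainder.find("]")
--         if close_idx != -1:
--             content = remainder[1:close_idx]
--             parts = content.split(",")
--             for p in parts:
--                 clean_p = p.strip()
--                 if clean_p:
--                     extras.append(clean_p)
--
--     # 4. Look up version
--     version = version_map.get(pkg_name)
--
--     # 5. Construct results
--     # Each result is ((name, ver, extra), marker)
--     results = []
--
--     # Base requirement
--     base_dep = (pkg_name, version, "__base__")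
--     results.append((base_dep, marker))
--
--     # Extras
--     for e in extras:
--         dep = (pkg_name, version, e)
--         results.append((dep, marker))
--
--     return results
-- ===== SOURCE B (Python) =====
-- def _extract_requirement_marker_pairs(req_string, version_map):
--     # Split requirement from marker at the first ';' using partition.
--     req_part, _, marker_text = req_string.partition(";")
--     marker = marker_text.strip() or None
--     req_part = req_part.strip()
--
--     if not req_part:
--         return []
--
--     # Package name = shortest prefix cut at any stop character: for each stop
--     # char, partition(c)[0] is the prefix before its first occurrence; the
--     # minimum-length such prefix ends exactly at the first stop char.
--     pkg_name = min((req_part.partition(c)[0] for c in "[=><!~ "), key=len)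
--
--     # Extras: the bracket group immediately after the name, if closed.
--     rest = req_part[len(pkg_name):]
--     extras = []
--     if rest.startswith("[") and "]" in rest:
--         content = rest[1:].partition("]")[0]
--         extras = [e for e in (p.strip() for p in content.split(",")) if e]
--
--     version = version_map.get(pkg_name)
--     return [((pkg_name, version, extra), marker)
--             for extra in ["__base__"] + extras]
-- ===== Notes on version B (the rewrite author's own statement) =====
-- stated objective: idiomatic
-- what changed: B replaces A's find()-slicing and manual per-character index-scanning loop with str.partition for the marker split, a min-over-partition-prefixes to locate the end of the package name, partition-based bracket extraction, and list comprehensions instead of accumulate-append loops.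
import Mathlib
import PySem

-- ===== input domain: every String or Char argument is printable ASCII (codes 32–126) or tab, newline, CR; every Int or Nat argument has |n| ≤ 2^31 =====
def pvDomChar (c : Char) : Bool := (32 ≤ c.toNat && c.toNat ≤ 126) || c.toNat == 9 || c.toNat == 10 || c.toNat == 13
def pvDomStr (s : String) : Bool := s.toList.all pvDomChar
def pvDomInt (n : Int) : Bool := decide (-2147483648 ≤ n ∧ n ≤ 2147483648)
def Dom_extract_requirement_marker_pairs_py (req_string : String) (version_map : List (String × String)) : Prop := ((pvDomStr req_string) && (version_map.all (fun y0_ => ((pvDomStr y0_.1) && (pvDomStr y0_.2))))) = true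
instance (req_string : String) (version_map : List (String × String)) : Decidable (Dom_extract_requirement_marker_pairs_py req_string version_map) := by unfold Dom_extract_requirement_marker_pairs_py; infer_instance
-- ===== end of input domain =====

-- B re-parses the requirement with str.partition and a min-of-prefix-cuts instead of A's
-- manual index-scanning loop, and builds the result lists by comprehension (objective: idiomatic).


-- ===== PORT A =====
-- A's `stop_chars` dict: its keys are the seven one-character strings below (the values,
-- all 1, are never read); `char in stop_chars` tests key membership of the 1-character
-- string `char`, ported exactly as membership of the character in this key list.
def pvStopCharsA : List Char := ['[', '=', '>', '<', '!', '~', ' ']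

-- A's scan `for i in range(len(req_part)): if req_part[i] in stop_chars: name_end_idx = i; break`
-- with `name_end_idx` initialised to `len(req_part)` (the `none` branch is unreachable:
-- every index produced by range(len(req_part)) is in range).
def pvNameEndLoopA (req : List Char) : List Int → Int
  | [] => (req.length : Int)
  | i :: rest =>
    match PySem.List.pyGet? req i with
    | some c => if pvStopCharsA.contains c then i else pvNameEndLoopA req rest
    | none => (req.length : Int)

def extract_requirement_marker_pairs_py (req_string : String) (version_map : List (String × String)) : List ((String × Option String × String) × Option String) :=
  let s := req_string.toList
  let semicolonIdx := PySem.Chars.find s [';']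
  let markerReq : Option String × List Char :=
    if semicolonIdx ≠ -1 then
      let markerText := PySem.Chars.strip (PySem.List.slice s (some (semicolonIdx + 1)) none)
      let marker := if markerText ≠ [] then some (String.ofList markerText) else none
      (marker, PySem.Chars.strip (PySem.List.slice s none (some semicolonIdx)))
    else
      (none, PySem.Chars.strip s)
  let marker := markerReq.1
  let req_part := markerReq.2
  if req_part = [] then []
  else
    let nameEndIdx := pvNameEndLoopA req_part (PySem.List.pyRange 0 (req_part.length : Int) 1)
    let pkg_name := PySem.List.slice req_part none (some nameEndIdx)
    let remainder := PySem.List.slice req_part (some nameEndIdx) none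
    let extras : List (List Char) :=
      if PySem.Chars.startswith remainder ['['] then
        let closeIdx := PySem.Chars.find remainder [']']
        if closeIdx ≠ -1 then
          let content := PySem.List.slice remainder (some 1) (some closeIdx)
          let parts := PySem.Chars.splitOn content [',']
          parts.foldl (fun acc p =>
            let clean_p := PySem.Chars.strip p
            if clean_p ≠ [] then acc ++ [clean_p] else acc) []
        else []
      else []
    let version := PySem.Dict.get? (PySem.Dict.mk version_map) (String.ofList pkg_name)
    let results : List ((String × Option String × String) × Option String) :=
      [((String.ofList pkg_name, version, "__base__"), marker)]
    extras.foldl (fun acc e => acc ++ [((String.ofList pkg_name, version, String.ofList e), marker)]) results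

-- ===== PORT B =====
-- `s.partition(sep)`, ported by hand via find + slices (exact: partition splits at the
-- first occurrence of sep; when sep is absent the result is (s, '', '')).
def pvPartition (s : List Char) (sep : List Char) : List Char × List Char × List Char :=
  let i := PySem.Chars.find s sep
  if i = -1 then (s, [], [])
  else (PySem.List.slice s none (some i), sep, PySem.List.slice s (some (i + (sep.length : Int))) none)

-- B's stop-character string "[=><!~ "
def pvStopStrB : List Char := ['[', '=', '>', '<', '!', '~', ' ']

def extract_requirement_marker_pairs_py_alt (req_string : String) (version_map : List (String × String)) : List ((String × Option String × String) × Option String) :=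
  let s := req_string.toList
  let part := pvPartition s [';']
  let markerStripped := PySem.Chars.strip part.2.2
  let marker : Option String :=      -- `marker_text.strip() or None`
    if markerStripped = [] then none else some (String.ofList markerStripped)
  let req_part := PySem.Chars.strip part.1
  if req_part = [] then []
  else
    -- min((req_part.partition(c)[0] for c in "[=><!~ "), key=len); the candidate list is
    -- a non-empty literal, so Python's min never raises; minD's default is never reached.
    let pkg_name := PySem.List.minD (pvStopStrB.map (fun c => (pvPartition req_part [c]).1)) (fun p => p.length) []
    let rest := PySem.List.slice req_part (some (pkg_name.length : Int)) none
    let extras : List (List Char) :=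
      if PySem.Chars.startswith rest ['['] && PySem.Chars.isIn [']'] rest then
        let content := (pvPartition (PySem.List.slice rest (some 1) none) [']']).1
        ((PySem.Chars.splitOn content [',']).map PySem.Chars.strip).filter (fun e => e ≠ [])
      else []
    let version := PySem.Dict.get? (PySem.Dict.mk version_map) (String.ofList pkg_name)
    (("__base__".toList) :: extras).map (fun e => ((String.ofList pkg_name, version, String.ofList e), marker))

-- ===== PRECONDITION & SPEC =====
def Spec_extract_requirement_marker_pairs_py (req_string : String) (version_map : List (String × String)) (out : List ((String × Option String × String) × Option String)) : Prop := out = extract_requirement_marker_pairs_py_alt req_string version_map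
instance (req_string : String) (version_map : List (String × String)) (out : List ((String × Option String × String) × Option String)) : Decidable (Spec_extract_requirement_marker_pairs_py req_string version_map out) := by unfold Spec_extract_requirement_marker_pairs_py; infer_instance

-- ===== CLAIM (what is proved, stated in full; the proofs are below) =====
def Claim_equal_extract_requirement_marker_pairs_py : Prop := ∀ (req_string : String) (version_map : List (String × String)), Dom_extract_requirement_marker_pairs_py req_string version_map → Spec_extract_requirement_marker_pairs_py req_string version_map (extract_requirement_marker_pairs_py req_string version_map)

-- ===== LEMMAS AND PROOFS =====

-- `[c] <+: l` is exactly "l starts with c".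
theorem pv_singleton_prefix (c : Char) (l : List Char) : [c] <+: l ↔ l.head? = some c := by
  cases l <;> simp [List.cons_prefix_cons, eq_comm]

-- every position strictly before the takeWhile frontier satisfies p
theorem pv_takeWhile_getElem_true (p : Char → Bool) (t : List Char) : ∀ (i : Nat)
    (_ : i < (t.takeWhile p).length) (hl : i < t.length), p t[i] = true := by
  induction t with
  | nil => intro i hi hl; simp at hl
  | cons c t ih =>
    intro i hi hl
    by_cases hp : p c = true
    · cases i with
      | zero => simpa using hp
      | succ j =>
        simp only [List.takeWhile_cons, hp, if_true, List.length_cons] at hi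
        simpa using ih j (by omega) (by simpa using hl)
    · simp [Bool.eq_false_iff.mpr hp] at hi

-- the takeWhile frontier, when inside the list, fails p
theorem pv_takeWhile_getElem_false (p : Char → Bool) (t : List Char) :
    ∀ (h : (t.takeWhile p).length < t.length), p (t[(t.takeWhile p).length]'h) = false := by
  induction t with
  | nil => intro h; simp at h
  | cons c t ih =>
    intro h
    by_cases hp : p c = true
    · have h' : (t.takeWhile p).length < t.length := by
        simp only [List.takeWhile_cons, hp, if_true, List.length_cons] at h; omega
      have := ih h'
      simp only [List.takeWhile_cons, hp, if_true, List.length_cons]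
      simpa using this
    · simp [Bool.eq_false_iff.mpr hp] at *

theorem pv_takeWhile_length_le (p : Char → Bool) (t : List Char) :
    (t.takeWhile p).length ≤ t.length :=
  (List.takeWhile_prefix p).length_le

-- characterisation of find of a single character: index of the first occurrence
theorem pv_find_singleton (t : List Char) (c : Char) :
    PySem.Chars.find t [c] = if c ∈ t then (((t.takeWhile (fun x => x ≠ c)).length : Nat) : Int) else -1 := by
  by_cases hc : c ∈ t
  · simp only [hc, if_true]
    have hfind : 0 ≤ PySem.Chars.find t [c] := by
      rw [PySem.Chars.find_nonneg_iff]
      exact (List.singleton_infix_iff c t).mpr hc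
    obtain ⟨hpre, hmin⟩ := PySem.Chars.find_spec hfind
    set n := (PySem.Chars.find t [c]).toNat with hn
    set L := (t.takeWhile (fun x => x ≠ c)).length with hL
    have hLlt : L < t.length := by
      rcases lt_or_eq_of_le (pv_takeWhile_length_le (fun x => x ≠ c) t) with h | h
      · exact h
      · exfalso
        obtain ⟨i, hi, hic⟩ := List.mem_iff_getElem.mp hc
        have := pv_takeWhile_getElem_true (fun x => x ≠ c) t i (by omega) hi
        simp [hic] at this
    have hatL : [c] <+: t.drop L := by
      rw [pv_singleton_prefix, List.head?_drop]
      have := pv_takeWhile_getElem_false (fun x => x ≠ c) t hLlt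
      simp only [decide_eq_false_iff_not, not_not] at this
      simp only [List.getElem?_eq_getElem hLlt, Option.some.injEq]
      exact this
    have hnleL : n ≤ L := by
      by_contra hgt
      exact hmin L (by omega) hatL
    have hLlen : n = L := by
      rcases Nat.lt_or_ge n L with hlt | _
      · exfalso
        have hnlt : n < t.length := by omega
        have hne := pv_takeWhile_getElem_true (fun x => x ≠ c) t n hlt hnlt
        rw [pv_singleton_prefix, List.head?_drop, List.getElem?_eq_getElem hnlt] at hpre
        simp at hpre hne
        exact hne hpre
      · omega
    omega
  · rw [if_neg hc, PySem.Chars.find_eq_neg_one_iff, List.singleton_infix_iff]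
    exact hc

-- partition(c)[0] is the prefix before the first c
theorem pv_partition_fst (t : List Char) (c : Char) :
    (pvPartition t [c]).1 = t.takeWhile (fun x => x ≠ c) := by
  unfold pvPartition
  rw [pv_find_singleton]
  by_cases hc : c ∈ t
  · have h0 : (0:Int) ≤ ((t.takeWhile (fun x => x ≠ c)).length : Int) := Int.natCast_nonneg _
    simp only [hc, if_true, if_neg (by omega : ¬ (((t.takeWhile (fun x => x ≠ c)).length : Nat) : Int) = -1)]
    simp only [PySem.List.slice_to_natCast]
    exact (List.prefix_iff_eq_take.mp (List.takeWhile_prefix _)).symm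
  · have hall : t.takeWhile (fun x => x ≠ c) = t := by
      simp only [List.takeWhile_eq_self_iff, decide_eq_true_eq]
      intro x hx h
      exact hc (h ▸ hx)
    rw [if_neg hc, if_pos rfl]
    exact hall.symm

-- A's index loop computes the takeWhile frontier (generalised over the start index)
theorem pv_nameEnd_go (req : List Char) : ∀ (n k : Nat), req.length - k = n → k ≤ req.length →
    pvNameEndLoopA req (PySem.List.pyRange (k : Int) (req.length : Int) 1)
      = ((k + ((req.drop k).takeWhile (fun c => !pvStopCharsA.contains c)).length : Nat) : Int) := by
  intro n
  induction n with
  | zero =>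
    intro k h1 h2
    have hk : k = req.length := by omega
    subst hk
    rw [PySem.List.pyRange_one_eq_nil (le_refl _)]
    simp [pvNameEndLoopA]
  | succ n ih =>
    intro k h1 h2
    have hk : k < req.length := by omega
    rw [PySem.List.pyRange_one_cons (by exact_mod_cast hk)]
    have hget : PySem.List.pyGet? req (k : Int) = some (req[k]'hk) := by
      rw [PySem.List.pyGet?_natCast, List.getElem?_eq_getElem hk]
    have hdrop : req.drop k = (req[k]'hk) :: req.drop (k+1) := List.drop_eq_getElem_cons hk
    by_cases hstop : pvStopCharsA.contains (req[k]'hk) = true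
    · simp only [pvNameEndLoopA, hget, hstop, if_true]
      rw [hdrop]
      simp
      intro _
      simpa using hstop
    · simp only [pvNameEndLoopA, hget, hstop, if_false]
      have hcast : ((k:Int) + 1) = (((k+1 : Nat)):Int) := by push_cast; ring
      rw [hcast, ih (k+1) (by omega) (by omega), hdrop]
      simp only [List.takeWhile_cons, Bool.eq_false_iff.mpr hstop]
      simp only [Bool.not_false, if_true, List.length_cons]
      push_cast
      omega

theorem pv_nameEnd_eq (req : List Char) :
    pvNameEndLoopA req (PySem.List.pyRange 0 (req.length : Int) 1)
      = (((req.takeWhile (fun c => !pvStopCharsA.contains c)).length : Nat) : Int) := by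
  have := pv_nameEnd_go req req.length 0 (by omega) (by omega)
  simpa using this

-- B's min-of-prefix-cuts computes the same frontier
theorem pv_min_candidates (t : List Char) :
    PySem.List.minD (pvStopStrB.map (fun c => (pvPartition t [c]).1)) (fun p => p.length) []
      = t.takeWhile (fun c => !pvStopCharsA.contains c) := by
  have hmapeq : pvStopStrB.map (fun c => (pvPartition t [c]).1)
      = pvStopStrB.map (fun c => t.takeWhile (fun x => x ≠ c)) :=
    List.map_congr_left (fun c _ => pv_partition_fst t c)
  rw [hmapeq]
  set q : Char → Bool := fun c => !pvStopCharsA.contains c with hq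
  set L := (t.takeWhile q).length with hL
  have hne : pvStopStrB.map (fun c => t.takeWhile (fun x => x ≠ c)) ≠ [] := by
    simp [pvStopStrB]
  have hmem := PySem.List.minD_mem (pvStopStrB.map (fun c => t.takeWhile (fun x => x ≠ c)))
    (fun p => p.length) [] hne
  obtain ⟨c, hcmem, hceq⟩ := List.mem_map.mp hmem
  have hAB : pvStopStrB = pvStopCharsA := rfl
  -- lower bound: every candidate has length at least L
  have hlb : ∀ c', c' ∈ pvStopCharsA → L ≤ (t.takeWhile (fun x => x ≠ c')).length := by
    intro c' hc'
    by_contra hlt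
    push Not at hlt
    have hMlt : (t.takeWhile (fun x => x ≠ c')).length < t.length :=
      lt_of_lt_of_le hlt (pv_takeWhile_length_le q t)
    have h1 := pv_takeWhile_getElem_false (fun x => x ≠ c') t hMlt
    have h2 := pv_takeWhile_getElem_true q t _ hlt hMlt
    simp only [decide_eq_false_iff_not, not_not] at h1
    rw [hq] at h2
    simp only [Bool.not_eq_true', List.contains_eq_mem, decide_eq_false_iff_not] at h2
    rw [h1] at h2
    exact h2 hc'
  -- upper bound: some candidate has length at most L
  have hub : (PySem.List.minD (pvStopStrB.map (fun c => t.takeWhile (fun x => x ≠ c)))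
      (fun p => p.length) []).length ≤ L := by
    by_cases hLl : L < t.length
    · have hfail : q (t[L]'hLl) = false := pv_takeWhile_getElem_false q t hLl
      have hc0 : (t[L]'hLl) ∈ pvStopCharsA := by
        rw [hq] at hfail
        simpa using hfail
      have hcand : (t.takeWhile (fun x => x ≠ (t[L]'hLl))).length ≤ L := by
        by_contra hgt
        push Not at hgt
        have := pv_takeWhile_getElem_true (fun x => x ≠ (t[L]'hLl)) t L hgt hLl
        simp at this
      have hkey := PySem.List.key_minD_le (pvStopStrB.map (fun c => t.takeWhile (fun x => x ≠ c)))
        (fun p => p.length) [] hne _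
        (List.mem_map_of_mem (hAB ▸ hc0 : (t[L]'hLl) ∈ pvStopStrB))
      exact le_trans hkey hcand
    · have hLe : L = t.length := by
        have := pv_takeWhile_length_le q t
        omega
      rw [← hceq, hLe]
      exact pv_takeWhile_length_le _ t
  have hlow : L ≤ (PySem.List.minD (pvStopStrB.map (fun c => t.takeWhile (fun x => x ≠ c)))
      (fun p => p.length) []).length := by
    have := hlb c (hAB ▸ hcmem)
    rw [hceq] at this
    exact this
  have hlen : (PySem.List.minD (pvStopStrB.map (fun c => t.takeWhile (fun x => x ≠ c)))
      (fun p => p.length) []).length = L := le_antisymm hub hlow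
  have hpref : PySem.List.minD (pvStopStrB.map (fun c => t.takeWhile (fun x => x ≠ c)))
      (fun p => p.length) [] <+: t := by
    rw [← hceq]
    exact List.takeWhile_prefix _
  rw [List.prefix_iff_eq_take.mp hpref, hlen, ← List.prefix_iff_eq_take.mp (List.takeWhile_prefix q)]

-- the two extras computations agree on the same remainder
theorem pv_extras_eq (rest : List Char) :
    (if PySem.Chars.startswith rest ['['] then
       (if PySem.Chars.find rest [']'] ≠ -1 then
          (PySem.Chars.splitOn (PySem.List.slice rest (some 1) (some (PySem.Chars.find rest [']']))) [',']).foldl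
            (fun acc p =>
              let clean_p := PySem.Chars.strip p
              if clean_p ≠ [] then acc ++ [clean_p] else acc) []
        else [])
     else ([] : List (List Char)))
    = (if PySem.Chars.startswith rest ['['] && PySem.Chars.isIn [']'] rest then
         ((PySem.Chars.splitOn (pvPartition (PySem.List.slice rest (some 1) none) [']']).1 [',']).map
            PySem.Chars.strip).filter (fun e => e ≠ [])
       else []) := by
  by_cases hsw : PySem.Chars.startswith rest ['['] = true
  · obtain ⟨t, rfl⟩ : ∃ t, rest = '[' :: t := by
      have := (PySem.Chars.startswith_iff rest ['[']).mp hsw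
      rw [pv_singleton_prefix] at this
      cases rest with
      | nil => simp at this
      | cons a t => exact ⟨t, by simp at this; rw [this]⟩
    by_cases hmem : ']' ∈ t
    · have hmem' : ']' ∈ '[' :: t := List.mem_cons_of_mem _ hmem
      have hfind : PySem.Chars.find ('[' :: t) [']'] = (((t.takeWhile (fun x => x ≠ ']')).length + 1 : Nat) : Int) := by
        rw [pv_find_singleton, if_pos hmem']
        simp
      have hIn : PySem.Chars.isIn [']'] ('[' :: t) = true := by
        rw [PySem.Chars.isIn_iff_infix, List.singleton_infix_iff]
        exact hmem'
      rw [hfind, hsw, hIn]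
      simp only [Bool.and_self, if_true]
      rw [if_pos (by omega : ¬ ((((t.takeWhile (fun x => x ≠ ']')).length + 1 : Nat)) : Int) = -1)]
      -- contents agree
      have hsl1 : PySem.List.slice ('[' :: t) (some 1) none = t := by
        have := PySem.List.slice_from_natCast ('[' :: t) 1
        simpa using this
      have hcontA : PySem.List.slice ('[' :: t) (some 1)
          (some ((((t.takeWhile (fun x => x ≠ ']')).length + 1 : Nat)) : Int)) = t.takeWhile (fun x => x ≠ ']') := by
        have h1 : (1 : Int) = ((1 : Nat) : Int) := rfl
        rw [h1, PySem.List.slice_natCast]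
        simp
        exact (List.prefix_iff_eq_take.mp (List.takeWhile_prefix _)).symm
      rw [hcontA, hsl1, pv_partition_fst]
      -- fold = map-filter
      rw [show (fun (acc : List (List Char)) p =>
            let clean_p := PySem.Chars.strip p
            if clean_p ≠ [] then acc ++ [clean_p] else acc)
          = (fun acc p => if (fun x => !(PySem.Chars.strip x == [])) p = true
              then acc ++ [PySem.Chars.strip p] else acc) from by
        funext acc p; simp]
      rw [PySem.List.foldl_append_if, List.filter_map]
      have hfe : (fun x : List Char => !(PySem.Chars.strip x).isEmpty)
          = (fun x : List Char => !decide (PySem.Chars.strip x = [])) := by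
        funext x
        cases h : PySem.Chars.strip x <;> simp
      simp [Function.comp_def, hfe]
    · have hIn : PySem.Chars.isIn [']'] ('[' :: t) = false := by
        rw [← Bool.not_eq_true, PySem.Chars.isIn_iff_infix, List.singleton_infix_iff]
        simp [hmem]
      have hfind : PySem.Chars.find ('[' :: t) [']'] = -1 := by
        rw [PySem.Chars.find_eq_neg_one_iff, List.singleton_infix_iff]
        simp [hmem]
      rw [hsw, hIn, hfind]
      simp
  · rw [Bool.not_eq_true] at hsw
    rw [hsw]
    simp

-- the common core after marker and requirement part have been split off
theorem pv_core (rp : List Char) (marker : Option String) (version_map : List (String × String)) :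
    (if rp = [] then [] else
      let nameEndIdx := pvNameEndLoopA rp (PySem.List.pyRange 0 (rp.length : Int) 1)
      let pkg_name := PySem.List.slice rp none (some nameEndIdx)
      let remainder := PySem.List.slice rp (some nameEndIdx) none
      let extras : List (List Char) :=
        if PySem.Chars.startswith remainder ['['] then
          let closeIdx := PySem.Chars.find remainder [']']
          if closeIdx ≠ -1 then
            let content := PySem.List.slice remainder (some 1) (some closeIdx)
            let parts := PySem.Chars.splitOn content [',']
            parts.foldl (fun acc p =>
              let clean_p := PySem.Chars.strip p
              if clean_p ≠ [] then acc ++ [clean_p] else acc) []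
          else []
        else []
      let version := PySem.Dict.get? (PySem.Dict.mk version_map) (String.ofList pkg_name)
      let results : List ((String × Option String × String) × Option String) :=
        [((String.ofList pkg_name, version, "__base__"), marker)]
      extras.foldl (fun acc e => acc ++ [((String.ofList pkg_name, version, String.ofList e), marker)]) results)
    = (if rp = [] then [] else
      let pkg_name := PySem.List.minD (pvStopStrB.map (fun c => (pvPartition rp [c]).1)) (fun p => p.length) []
      let rest := PySem.List.slice rp (some (pkg_name.length : Int)) none
      let extras : List (List Char) :=
        if PySem.Chars.startswith rest ['['] && PySem.Chars.isIn [']'] rest then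
          let content := (pvPartition (PySem.List.slice rest (some 1) none) [']']).1
          ((PySem.Chars.splitOn content [',']).map PySem.Chars.strip).filter (fun e => e ≠ [])
        else []
      let version := PySem.Dict.get? (PySem.Dict.mk version_map) (String.ofList pkg_name)
      (("__base__".toList) :: extras).map (fun e => ((String.ofList pkg_name, version, String.ofList e), marker))) := by
  by_cases hrp : rp = []
  · simp [hrp]
  · simp only [if_neg hrp]
    have htake : rp.take ((rp.takeWhile (fun c => !pvStopCharsA.contains c)).length)
        = rp.takeWhile (fun c => !pvStopCharsA.contains c) :=
      (List.prefix_iff_eq_take.mp (List.takeWhile_prefix _)).symm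
    simp only [pv_nameEnd_eq, pv_min_candidates, PySem.List.slice_to_natCast,
      PySem.List.slice_from_natCast, htake]
    rw [pv_extras_eq]
    rw [PySem.List.foldl_append_singleton_eq_map]
    simp

-- the two marker/requirement splits agree
theorem pv_split_eq (s : List Char) :
    (if PySem.Chars.find s [';'] ≠ -1 then
       (let markerText := PySem.Chars.strip (PySem.List.slice s (some (PySem.Chars.find s [';'] + 1)) none)
        let marker := if markerText ≠ [] then some (String.ofList markerText) else none
        (marker, PySem.Chars.strip (PySem.List.slice s none (some (PySem.Chars.find s [';'])))))
     else ((none : Option String), PySem.Chars.strip s))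
    = ((if PySem.Chars.strip (pvPartition s [';']).2.2 = [] then none
        else some (String.ofList (PySem.Chars.strip (pvPartition s [';']).2.2))),
       PySem.Chars.strip (pvPartition s [';']).1) := by
  unfold pvPartition
  by_cases hf : PySem.Chars.find s [';'] = -1
  · rw [if_neg (by simp [hf]), if_pos hf]
    simp [show PySem.Chars.strip ([] : List Char) = [] from rfl]
  · rw [if_pos hf, if_neg hf]
    simp only []
    by_cases hm : PySem.Chars.strip (PySem.List.slice s (some (PySem.Chars.find s [';'] + 1)) none) = []
    · rw [if_neg (by simp [hm]), if_pos (by simpa using hm)]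
    · rw [if_pos hm, if_neg (by simpa using hm)]
      norm_num

-- ===== VERDICT (by name: the statement is the Claim_ definition above) =====
theorem extract_requirement_marker_pairs_py_spec : Claim_equal_extract_requirement_marker_pairs_py := by
  intro req_string version_map _
  unfold Spec_extract_requirement_marker_pairs_py
  unfold extract_requirement_marker_pairs_py extract_requirement_marker_pairs_py_alt
  simp only [pv_split_eq]
  exact pv_core (PySem.Chars.strip (pvPartition req_string.toList [';']).1)
    (if PySem.Chars.strip (pvPartition req_string.toList [';']).2.2 = [] then none
     else some (String.ofList (PySem.Chars.strip (pvPartition req_string.toList [';']).2.2)))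
    version_map
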